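-- pv_equiv track=rewrite | github.com/ray12514/lib-locator | cli.py | select_rundown_reference_node
-- ===== SOURCE A (Python) =====
-- from typing import Dict, List, Set
--
-- def select_rundown_reference_node(login_rows: List[Dict], compute_rows: List[Dict], avoid_nodes: Set[str]) -> tuple:
--     login_nodes = sorted({
--         str(r.get("node", ""))
--         for r in login_rows
--         if r.get("result") == "observed" and r.get("node")
--     })
--     for n in login_nodes:
--         if n not in avoid_nodes:
--             return n, "login"
--     if login_nodes:
--         return login_nodes[0], "login"
--
--     compute_consistent = sorted({
--         str(r.get("node", ""))
--         for r in compute_rows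
--         if r.get("result") == "consistent" and r.get("node")
--     })
--     for n in compute_consistent:
--         if n not in avoid_nodes:
--             return n, "compute"
--     if compute_consistent:
--         return compute_consistent[0], "compute"
--
--     compute_ok = sorted({
--         str(r.get("node", ""))
--         for r in compute_rows
--         if r.get("result") in ("consistent", "inconsistent", "missing") and r.get("node")
--     })
--     for n in compute_ok:
--         if n not in avoid_nodes:
--             return n, "compute"
--     if compute_ok:
--         return compute_ok[0], "compute"
--
--     return "", ""
-- ===== SOURCE B (Python) =====
-- def select_rundown_reference_node(login_rows, compute_rows, avoid_nodes):
--     tiers = [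
--         (login_rows, lambda r: r.get("result") == "observed", "login"),
--         (compute_rows, lambda r: r.get("result") == "consistent", "compute"),
--         (compute_rows, lambda r: r.get("result") in ("consistent", "inconsistent", "missing"), "compute"),
--     ]
--     for rows, pred, label in tiers:
--         candidates = {str(r["node"]) for r in rows if pred(r) and r.get("node")}
--         if candidates:
--             return min(candidates, key=lambda n: (n in avoid_nodes, n)), label
--     return "", ""
-- ===== Notes on version B (the rewrite author's own statement) =====
-- stated objective: simpler
-- what changed: Replaces A's three copy-pasted sort-then-scan-then-fallback blocks by a data-driven loop over a tier table that picks each tier's winner with a single min under the composite key (avoided?, name).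
import Mathlib
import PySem

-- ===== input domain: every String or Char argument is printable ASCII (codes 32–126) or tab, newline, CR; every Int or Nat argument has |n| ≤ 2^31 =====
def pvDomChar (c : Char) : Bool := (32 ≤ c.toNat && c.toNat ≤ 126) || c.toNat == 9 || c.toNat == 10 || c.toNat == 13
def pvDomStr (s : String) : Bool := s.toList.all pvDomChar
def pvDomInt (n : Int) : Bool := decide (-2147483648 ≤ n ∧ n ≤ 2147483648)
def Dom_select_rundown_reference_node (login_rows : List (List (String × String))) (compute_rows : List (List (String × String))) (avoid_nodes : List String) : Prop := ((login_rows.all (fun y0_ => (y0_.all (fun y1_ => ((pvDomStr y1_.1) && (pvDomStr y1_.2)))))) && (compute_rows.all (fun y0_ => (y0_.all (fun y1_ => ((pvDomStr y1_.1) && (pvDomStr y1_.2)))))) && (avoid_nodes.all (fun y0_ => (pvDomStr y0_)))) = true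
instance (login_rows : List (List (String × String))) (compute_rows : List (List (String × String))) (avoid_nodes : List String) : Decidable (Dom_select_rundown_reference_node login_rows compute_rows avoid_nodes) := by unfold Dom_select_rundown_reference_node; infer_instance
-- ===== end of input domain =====

-- B replaces A's three copy-pasted sort/scan/fallback blocks by one loop over a tier table,
-- picking each non-empty tier's node with a single min under the composite key (avoided?, name); objective: simpler.

-- ===== PORT A =====
-- truthiness of r.get("node") (None and "" are falsy)
def pvTruthy (o : Option String) : Bool :=
  match o with
  | some s => !(s == "")
  | none => false

-- 'for n in ns: if n not in avoid_nodes: return n' (first node not avoided)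
def pvScanA (avoid : List String) : List String → Option String
  | [] => none
  | n :: t => if avoid.contains n then pvScanA avoid t else some n

def select_rundown_reference_node (login_rows : List (List (String × String))) (compute_rows : List (List (String × String))) (avoid_nodes : List String) : String × String :=
  let login_nodes := PySem.List.sorted (PySem.Set.ofList ((login_rows.filter (fun r => ((PySem.Dict.mk r).get? "result" == some "observed") && pvTruthy ((PySem.Dict.mk r).get? "node"))).map (fun r => (PySem.Dict.mk r).getD "node" ""))) (fun x => x) false
  match pvScanA avoid_nodes login_nodes, login_nodes with
  | some n, _ => (n, "login")
  | none, n0 :: _ => (n0, "login")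
  | none, [] =>
    let compute_consistent := PySem.List.sorted (PySem.Set.ofList ((compute_rows.filter (fun r => ((PySem.Dict.mk r).get? "result" == some "consistent") && pvTruthy ((PySem.Dict.mk r).get? "node"))).map (fun r => (PySem.Dict.mk r).getD "node" ""))) (fun x => x) false
    match pvScanA avoid_nodes compute_consistent, compute_consistent with
    | some n, _ => (n, "compute")
    | none, n0 :: _ => (n0, "compute")
    | none, [] =>
      let compute_ok := PySem.List.sorted (PySem.Set.ofList ((compute_rows.filter (fun r => (((PySem.Dict.mk r).get? "result" == some "consistent") || ((PySem.Dict.mk r).get? "result" == some "inconsistent") || ((PySem.Dict.mk r).get? "result" == some "missing")) && pvTruthy ((PySem.Dict.mk r).get? "node"))).map (fun r => (PySem.Dict.mk r).getD "node" ""))) (fun x => x) false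
      match pvScanA avoid_nodes compute_ok, compute_ok with
      | some n, _ => (n, "compute")
      | none, n0 :: _ => (n0, "compute")
      | none, [] => ("", "")

-- ===== PORT B =====
-- {str(r["node"]) for r in rows if pred(r.get("result")) and r.get("node")}
def pvCandidates (rows : List (List (String × String))) (p : Option String → Bool) : PySem.Set String :=
  PySem.Set.ofList (rows.filterMap (fun r =>
    match (PySem.Dict.mk r).get? "node" with
    | some s => if p ((PySem.Dict.mk r).get? "result") && !(s == "") then some s else none
    | none => none))

-- 'for rows, pred, label in tiers: ... return min(candidates, key=lambda n: (n in avoid_nodes, n)), label'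
def pvTierLoop (avoid : List String) : List ((List (List (String × String))) × (Option String → Bool) × String) → String × String
  | [] => ("", "")
  | (rows, p, label) :: rest =>
    match PySem.List.min2? (pvCandidates rows p) (fun n => avoid.contains n) (fun n => n) with
    | some m => (m, label)
    | none => pvTierLoop avoid rest

def select_rundown_reference_node_alt (login_rows : List (List (String × String))) (compute_rows : List (List (String × String))) (avoid_nodes : List String) : String × String :=
  pvTierLoop avoid_nodes
    [(login_rows, fun o => o == some "observed", "login"),
     (compute_rows, fun o => o == some "consistent", "compute"),
     (compute_rows, fun o => (o == some "consistent" || o == some "inconsistent" || o == some "missing"), "compute")]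

-- ===== PRECONDITION & SPEC =====
def Spec_select_rundown_reference_node (login_rows : List (List (String × String))) (compute_rows : List (List (String × String))) (avoid_nodes : List String) (out : String × String) : Prop := out = select_rundown_reference_node_alt login_rows compute_rows avoid_nodes
instance (login_rows : List (List (String × String))) (compute_rows : List (List (String × String))) (avoid_nodes : List String) (out : String × String) : Decidable (Spec_select_rundown_reference_node login_rows compute_rows avoid_nodes out) := by unfold Spec_select_rundown_reference_node; infer_instance

-- ===== CLAIM (what is proved, stated in full; the proofs are below) =====
def Claim_equal_select_rundown_reference_node : Prop := ∀ (login_rows : List (List (String × String))) (compute_rows : List (List (String × String))) (avoid_nodes : List String), Dom_select_rundown_reference_node login_rows compute_rows avoid_nodes → Spec_select_rundown_reference_node login_rows compute_rows avoid_nodes (select_rundown_reference_node login_rows compute_rows avoid_nodes)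

-- ===== LEMMAS AND PROOFS =====

-- the strict lexicographic order on the composite key (n in avoid, n)
def pvLexLt (avoid : List String) (a b : String) : Prop :=
  (avoid.contains a < avoid.contains b) ∨ (¬ avoid.contains b < avoid.contains a ∧ a < b)

-- A's filter+map comprehension list equals B's filterMap extraction
theorem pv_extract_eq (rows : List (List (String × String))) (p : Option String → Bool) :
    (rows.filter (fun r => p ((PySem.Dict.mk r).get? "result") && pvTruthy ((PySem.Dict.mk r).get? "node"))).map (fun r => (PySem.Dict.mk r).getD "node" "")
    = rows.filterMap (fun r =>
        match (PySem.Dict.mk r).get? "node" with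
        | some s => if p ((PySem.Dict.mk r).get? "result") && !(s == "") then some s else none
        | none => none) := by
  induction rows with
  | nil => rfl
  | cons r t ih =>
    rw [List.filter_cons, List.filterMap_cons]
    cases hn : (PySem.Dict.mk r).get? "node" with
    | none =>
      simp only [pvTruthy, Bool.and_false]
      simpa using ih
    | some s =>
      by_cases hp : p ((PySem.Dict.mk r).get? "result")
      · by_cases hs : s = ""
        · simp only [pvTruthy, hp, hs]
          simpa using ih
        · have hget : (PySem.Dict.mk r).getD "node" "" = s := by
            simp [PySem.Dict.getD, hn]
          simp only [pvTruthy, hp]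
          simp only [Bool.true_and]
          rw [if_pos (by simpa using hs), if_pos (by simpa using hs)]
          simpa [hget] using congrArg (List.cons s) ih
      · simp only [pvTruthy]
        have hp' : p ((PySem.Dict.mk r).get? "result") = false := by simpa using hp
        simp only [hp', Bool.false_and]
        simpa using ih

theorem pv_bool_lt_iff (a b : Bool) : a < b ↔ a = false ∧ b = true := by cases a <;> cases b <;> decide

theorem pv_scanA_none (avoid : List String) (L : List String)
    (h : pvScanA avoid L = none) : ∀ y ∈ L, avoid.contains y = true := by
  induction L with
  | nil => simp
  | cons x t ih =>
    intro y hy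
    by_cases hx : avoid.contains x = true
    · rw [pvScanA, if_pos hx] at h
      rcases List.mem_cons.mp hy with hy | hy
      · exact hy ▸ hx
      · exact ih h y hy
    · rw [pvScanA, if_neg hx] at h
      exact absurd h (by simp)

theorem pv_scanA_some (avoid : List String) (L : List String) (n : String)
    (hpw : L.Pairwise (· < ·)) (h : pvScanA avoid L = some n) :
    avoid.contains n = false ∧ n ∈ L ∧ ∀ y ∈ L, y = n ∨ pvLexLt avoid n y := by
  induction L with
  | nil => exact absurd h (by simp [pvScanA])
  | cons x t ih =>
    rcases List.pairwise_cons.mp hpw with ⟨hxt, hpt⟩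
    by_cases hx : avoid.contains x = true
    · rw [pvScanA, if_pos hx] at h
      rcases ih hpt h with ⟨hcn, hnt, hmin⟩
      refine ⟨hcn, List.mem_cons_of_mem _ hnt, ?_⟩
      intro y hy
      rcases List.mem_cons.mp hy with hy | hy
      · subst hy
        right; left
        rw [hcn, hx]
        decide
      · exact hmin y hy
    · rw [pvScanA, if_neg hx] at h
      have hxn : x = n := by simpa using h
      subst hxn
      have hcx : avoid.contains x = false := by simpa using hx
      refine ⟨hcx, List.mem_cons_self, ?_⟩
      intro y hy
      rcases List.mem_cons.mp hy with hy | hy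
      · exact Or.inl hy
      · right; right
        refine ⟨?_, hxt y hy⟩
        rw [hcx]
        intro hlt
        rcases (pv_bool_lt_iff _ _).mp hlt with ⟨_, hf⟩
        simp at hf

theorem pv_min2_of_strict (avoid : List String) (S : List String) (m : String)
    (hm : m ∈ S) (hmin : ∀ y ∈ S, y = m ∨ pvLexLt avoid m y) :
    PySem.List.min2? S (fun n => avoid.contains n) (fun n => n) = some m := by
  have irrefl : ∀ a : String, ¬ pvLexLt avoid a a := by
    intro a h
    rcases h with h | h
    · exact lt_irrefl _ h
    · exact lt_irrefl _ h.2
  have asymm : ∀ a b : String, pvLexLt avoid a b → ¬ pvLexLt avoid b a := by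
    intro a b h1 h2
    rcases h1 with h1 | h1 <;> rcases h2 with h2 | h2
    · exact lt_asymm h1 h2
    · exact h2.1 h1
    · exact h1.1 h2
    · exact lt_asymm h1.2 h2.2
  have step_eq : ∀ (x mm : String),
      ((decide (avoid.contains x < avoid.contains mm) ||
        (!decide (avoid.contains mm < avoid.contains x) && decide (x < mm))) = true) ↔ pvLexLt avoid x mm := by
    intro x mm
    simp [pvLexLt]
  have key : ∀ (step : Option String → String → Option String),
      (∀ x, step none x = some x) →
      (∀ a x, pvLexLt avoid x a → step (some a) x = some x) →
      (∀ a x, ¬ pvLexLt avoid x a → step (some a) x = some a) →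
      ∀ (t : List String) (acc : Option String),
      (m ∈ t ∨ acc = some m) →
      (∀ y ∈ t, y = m ∨ pvLexLt avoid m y) →
      (∀ a, acc = some a → a = m ∨ pvLexLt avoid m a) →
      t.foldl step acc = some m := by
    intro step h0 h1 h2 t
    induction t with
    | nil =>
      intro acc hin _ hacc
      rcases hin with hin | hin
      · simp at hin
      · simpa using hin
    | cons x t ih =>
      intro acc hin hminc hacc
      have hx : x = m ∨ pvLexLt avoid m x := hminc x List.mem_cons_self
      cases acc with
      | none =>
        rw [List.foldl_cons, h0 x]
        apply ih
        · rcases hx with hx | hx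
          · exact Or.inr (by rw [hx])
          · rcases hin with hin | hin
            · rcases List.mem_cons.mp hin with hin | hin
              · subst hin; exact absurd hx (irrefl m)
              · exact Or.inl hin
            · exact absurd hin (by simp)
        · exact fun y hy => hminc y (List.mem_cons_of_mem _ hy)
        · intro a ha
          exact (Option.some.injEq _ _ ▸ ha : x = a) ▸ hx
      | some a =>
        have ha : a = m ∨ pvLexLt avoid m a := hacc a rfl
        rw [List.foldl_cons]
        by_cases hcond : pvLexLt avoid x a
        · rw [h1 a x hcond]
          apply ih
          · rcases hx with hx | hx
            · exact Or.inr (by rw [hx])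
            · rcases ha with ha | ha
              · exact absurd hcond (ha ▸ asymm m x hx)
              · rcases hin with hin | hin
                · rcases List.mem_cons.mp hin with hin | hin
                  · subst hin; exact absurd hx (irrefl m)
                  · exact Or.inl hin
                · have ham : a = m := by simpa using hin
                  exact absurd ha (by rw [ham]; exact irrefl m)
          · exact fun y hy => hminc y (List.mem_cons_of_mem _ hy)
          · intro b hb
            exact (Option.some.injEq _ _ ▸ hb : x = b) ▸ hx
        · rw [h2 a x hcond]
          apply ih
          · rcases ha with ha | ha
            · exact Or.inr (by rw [ha])
            · rcases hin with hin | hin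
              · rcases List.mem_cons.mp hin with hin | hin
                · exact absurd ha (hin ▸ hcond)
                · exact Or.inl hin
              · have ham : a = m := by simpa using hin
                exact absurd ha (by rw [ham]; exact irrefl m)
          · exact fun y hy => hminc y (List.mem_cons_of_mem _ hy)
          · exact fun b hb => hacc b hb
  unfold PySem.List.min2?
  apply key _ ?h0 ?h1 ?h2 S none (Or.inl hm) hmin (fun a ha => by cases ha)
  case h0 => intro x; rfl
  case h1 =>
    intro a x h
    simp only []
    rw [if_pos ((step_eq x a).mpr h)]
  case h2 =>
    intro a x h
    simp only []
    rw [if_neg (fun hc => h ((step_eq x a).mp hc))]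

-- the per-tier core: A's sorted-scan-with-fallback equals B's composite-key min over the candidate set
theorem pv_tier_core (xs : List String) (avoid : List String) :
    (match pvScanA avoid (PySem.List.sorted (PySem.Set.ofList xs) (fun x => x) false),
           PySem.List.sorted (PySem.Set.ofList xs) (fun x => x) false with
     | some n, _ => some n
     | none, n0 :: _ => some n0
     | none, ([] : List String) => none)
    = PySem.List.min2? (PySem.Set.ofList xs) (fun n => avoid.contains n) (fun n : String => n) := by
  set L := PySem.List.sorted (PySem.Set.ofList xs) (fun x => x) false with hLdef
  have hpw : L.Pairwise (· < ·) := PySem.List.sorted_ofList_pairwise_lt xs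
  have hmem : ∀ y, y ∈ L ↔ y ∈ PySem.Set.ofList xs := by
    intro y; rw [hLdef]; exact PySem.List.mem_sorted _ _ _ _
  cases hs : pvScanA avoid L with
  | some n =>
    rcases pv_scanA_some avoid L n hpw hs with ⟨-, hnL, hmin⟩
    rw [pv_min2_of_strict avoid _ n ((hmem n).mp hnL)
      (fun y hy => hmin y ((hmem y).mpr hy))]
  | none =>
    have hall := pv_scanA_none avoid L hs
    cases hL : L with
    | nil =>
      have hS : PySem.Set.ofList xs = [] :=
        (PySem.List.sorted_eq_nil_iff _ _ _).mp (hLdef ▸ hL)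
      rw [hS]
      rfl
    | cons n0 t =>
      rcases List.pairwise_cons.mp (hL ▸ hpw) with ⟨hn0t, -⟩
      have hmin : ∀ y ∈ L, y = n0 ∨ pvLexLt avoid n0 y := by
        intro y hy
        rw [hL] at hy
        rcases List.mem_cons.mp hy with hy | hy
        · exact Or.inl hy
        · right
          right
          refine ⟨?_, hn0t y hy⟩
          have h1 : avoid.contains n0 = true := hall n0 (by rw [hL]; exact List.mem_cons_self)
          have h2 : avoid.contains y = true := hall y (by rw [hL]; exact List.mem_cons_of_mem _ hy)
          rw [h2, h1]
          decide
      rw [pv_min2_of_strict avoid _ n0 ((hmem n0).mp (by rw [hL]; exact List.mem_cons_self))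
        (fun y hy => hmin y ((hmem y).mpr hy))]

-- beta-reduced instances of pv_extract_eq at the three tier predicates
theorem pv_extract_eq1 (rows : List (List (String × String))) :
    (rows.filter (fun r => ((PySem.Dict.mk r).get? "result" == some "observed") && pvTruthy ((PySem.Dict.mk r).get? "node"))).map (fun r => (PySem.Dict.mk r).getD "node" "")
    = rows.filterMap (fun r =>
        match (PySem.Dict.mk r).get? "node" with
        | some s => if ((PySem.Dict.mk r).get? "result" == some "observed") && !(s == "") then some s else none
        | none => none) := pv_extract_eq rows (fun o => o == some "observed")

theorem pv_extract_eq2 (rows : List (List (String × String))) :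
    (rows.filter (fun r => ((PySem.Dict.mk r).get? "result" == some "consistent") && pvTruthy ((PySem.Dict.mk r).get? "node"))).map (fun r => (PySem.Dict.mk r).getD "node" "")
    = rows.filterMap (fun r =>
        match (PySem.Dict.mk r).get? "node" with
        | some s => if ((PySem.Dict.mk r).get? "result" == some "consistent") && !(s == "") then some s else none
        | none => none) := pv_extract_eq rows (fun o => o == some "consistent")

theorem pv_extract_eq3 (rows : List (List (String × String))) :
    (rows.filter (fun r => (((PySem.Dict.mk r).get? "result" == some "consistent") || ((PySem.Dict.mk r).get? "result" == some "inconsistent") || ((PySem.Dict.mk r).get? "result" == some "missing")) && pvTruthy ((PySem.Dict.mk r).get? "node"))).map (fun r => (PySem.Dict.mk r).getD "node" "")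
    = rows.filterMap (fun r =>
        match (PySem.Dict.mk r).get? "node" with
        | some s => if (((PySem.Dict.mk r).get? "result" == some "consistent") || ((PySem.Dict.mk r).get? "result" == some "inconsistent") || ((PySem.Dict.mk r).get? "result" == some "missing")) && !(s == "") then some s else none
        | none => none) := pv_extract_eq rows (fun o => o == some "consistent" || o == some "inconsistent" || o == some "missing")

-- ===== VERDICT (by name: the statement is the Claim_ definition above) =====
theorem select_rundown_reference_node_spec : Claim_equal_select_rundown_reference_node := by
  intro login_rows compute_rows avoid_nodes _
  unfold Spec_select_rundown_reference_node
  simp only [select_rundown_reference_node, select_rundown_reference_node_alt, pvTierLoop, pvCandidates]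
  rw [pv_extract_eq1 login_rows, pv_extract_eq2 compute_rows, pv_extract_eq3 compute_rows]
  rw [← pv_tier_core _ avoid_nodes, ← pv_tier_core _ avoid_nodes, ← pv_tier_core _ avoid_nodes]
  set L1 := PySem.List.sorted (PySem.Set.ofList (login_rows.filterMap (fun r =>
        match (PySem.Dict.mk r).get? "node" with
        | some s => if ((PySem.Dict.mk r).get? "result" == some "observed") && !(s == "") then some s else none
        | none => none))) (fun x => x) false with hL1
  set L2 := PySem.List.sorted (PySem.Set.ofList (compute_rows.filterMap (fun r =>
        match (PySem.Dict.mk r).get? "node" with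
        | some s => if ((PySem.Dict.mk r).get? "result" == some "consistent") && !(s == "") then some s else none
        | none => none))) (fun x => x) false with hL2
  set L3 := PySem.List.sorted (PySem.Set.ofList (compute_rows.filterMap (fun r =>
        match (PySem.Dict.mk r).get? "node" with
        | some s => if (((PySem.Dict.mk r).get? "result" == some "consistent") || ((PySem.Dict.mk r).get? "result" == some "inconsistent") || ((PySem.Dict.mk r).get? "result" == some "missing")) && !(s == "") then some s else none
        | none => none))) (fun x => x) false with hL3
  cases h1 : pvScanA avoid_nodes L1 with
  | some n => cases L1 <;> rfl
  | none =>
    cases L1 with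
    | cons n0 t => rfl
    | nil =>
      cases h2 : pvScanA avoid_nodes L2 with
      | some n => cases L2 <;> rfl
      | none =>
        cases L2 with
        | cons n0 t => rfl
        | nil =>
          cases h3 : pvScanA avoid_nodes L3 with
          | some n => cases L3 <;> rfl
          | none => cases L3 <;> rfl
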